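-- pv_equiv track=rewrite | github.com/dalryan/advent-of-code | 2024/02/python/main.py | part_two
-- ===== SOURCE A (Python) =====
-- def part_one(lst: list[int]) -> bool:
--     """Iterate of the list and check that it fits the safe criteria
--
--     - strictly monotonically increasing OR decreasing
--     - difference between ints is 1 <= x <= 3
--     """
--     inc, dec = [], []
--     # there's probably a nicer way to do this
--     for i in range(len(lst) - 1):
--         inc.append(lst[i] < lst[i + 1])
--         dec.append(lst[i] > lst[i + 1])
--         diff = abs(lst[i] - lst[i + 1])
--         if not (1 <= diff <= 3):
--             return False
--     return all(inc) or all(dec)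
--
-- def part_two(lst: list[int]) -> bool:
--     """Check for a safe subsequence where 1 value can be removed"""
--     if part_one(lst):
--         return True
--
--     for i in range(len(lst)):
--         left, right = lst[:i], lst[i + 1 :]
--         if part_one(left + right):
--             return True
--     return False
-- ===== SOURCE B (Python) =====
-- def part_two(lst: list[int]) -> bool:
--     """Linear-time check: a list is safe (or fixable by one removal) per direction
--     by locating the first violating adjacent pair and testing only the two
--     removals that can repair it."""
--     def first_bad(seq, ok):
--         for i, (a, b) in enumerate(zip(seq, seq[1:])):
--             if not ok(a, b):
--                 return i
--         return None
--
--     def safe_with_one_removal(seq, ok):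
--         i = first_bad(seq, ok)
--         if i is None:
--             return True
--         return (first_bad(seq[:i] + seq[i + 1:], ok) is None
--                 or first_bad(seq[:i + 1] + seq[i + 2:], ok) is None)
--
--     inc = lambda a, b: 1 <= b - a <= 3
--     dec = lambda a, b: 1 <= a - b <= 3
--     return safe_with_one_removal(lst, inc) or safe_with_one_removal(lst, dec)
-- ===== Notes on version B (the rewrite author's own statement) =====
-- stated objective: faster
-- what changed: Instead of re-checking a full copy of the list for every removal index (quadratic), B finds the first violating adjacent pair per direction and tests only the two removals that can repair it.
import Mathlib
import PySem

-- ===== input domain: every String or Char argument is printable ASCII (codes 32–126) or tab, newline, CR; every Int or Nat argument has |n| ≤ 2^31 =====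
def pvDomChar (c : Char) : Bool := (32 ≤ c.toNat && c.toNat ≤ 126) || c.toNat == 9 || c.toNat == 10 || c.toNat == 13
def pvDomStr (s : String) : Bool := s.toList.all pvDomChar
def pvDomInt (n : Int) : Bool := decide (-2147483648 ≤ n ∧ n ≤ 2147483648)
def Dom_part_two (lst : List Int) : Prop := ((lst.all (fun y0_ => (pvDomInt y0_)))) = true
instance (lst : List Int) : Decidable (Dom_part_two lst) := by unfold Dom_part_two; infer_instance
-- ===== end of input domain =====

-- B replaces A's try-every-removal quadratic scan by a per-direction linear scan that
-- locates the first violating adjacent pair and tests only the two repairing removals.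

-- ===== PORT A =====
-- loop of part_one: for i in range(len-1) over adjacent pairs, accumulating inc/dec,
-- early-returning False on a bad difference
def poLoop (inc dec : List Bool) : List Int → Bool
  | a :: b :: r =>
      let inc' := inc ++ [decide (a < b)]
      let dec' := dec ++ [decide (a > b)]
      let diff := (a - b).natAbs
      if ¬ (1 ≤ diff ∧ diff ≤ 3) then false
      else poLoop inc' dec' (b :: r)
  | _ => inc.all id || dec.all id

def part_one (lst : List Int) : Bool := poLoop [] [] lst

def part_two (lst : List Int) : Bool :=
  if part_one lst then true
  else
    -- for i in range(len(lst)): early return True = .any; lst[:i] = take i, lst[i+1:] = drop (i+1)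
    (List.range lst.length).any (fun i => part_one (lst.take i ++ lst.drop (i + 1)))

-- ===== PORT B =====
-- first_bad: index of first adjacent pair failing ok, else none
def fbAux (ok : Int → Int → Bool) (i : Nat) : List Int → Option Nat
  | a :: b :: r => if ok a b then fbAux ok (i + 1) (b :: r) else some i
  | _ => none

def firstBad (ok : Int → Int → Bool) (seq : List Int) : Option Nat := fbAux ok 0 seq

def safeWithOneRemoval (ok : Int → Int → Bool) (seq : List Int) : Bool :=
  match firstBad ok seq with
  | none => true
  | some i =>
      (firstBad ok (seq.take i ++ seq.drop (i + 1))).isNone ||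
      (firstBad ok (seq.take (i + 1) ++ seq.drop (i + 2))).isNone

def incOk (a b : Int) : Bool := decide (1 ≤ b - a ∧ b - a ≤ 3)
def decOk (a b : Int) : Bool := decide (1 ≤ a - b ∧ a - b ≤ 3)

def part_two_alt (lst : List Int) : Bool :=
  safeWithOneRemoval incOk lst || safeWithOneRemoval decOk lst

-- ===== PRECONDITION & SPEC =====
def Spec_part_two (lst : List Int) (out : Bool) : Prop := out = part_two_alt lst
instance (lst : List Int) (out : Bool) : Decidable (Spec_part_two lst out) := by unfold Spec_part_two; infer_instance

-- ===== CLAIM (what is proved, stated in full; the proofs are below) =====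
def Claim_equal_part_two : Prop := ∀ (lst : List Int), Dom_part_two lst → Spec_part_two lst (part_two lst)

-- ===== LEMMAS AND PROOFS =====

-- all adjacent pairs satisfy ok
def allOk (ok : Int → Int → Bool) : List Int → Bool
  | a :: b :: r => ok a b && allOk ok (b :: r)
  | _ => true

lemma poLoop_eq (inc dec : List Bool) (s : List Int) :
    poLoop inc dec s =
      ((inc.all id && allOk incOk s) || (dec.all id && allOk decOk s)) := by
  induction s generalizing inc dec with
  | nil => simp [poLoop, allOk]
  | cons a t ih =>
    cases t with
    | nil => simp [poLoop, allOk]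
    | cons b r =>
      by_cases h : 1 ≤ (a - b).natAbs ∧ (a - b).natAbs ≤ 3
      · have hinc : incOk a b = decide (a < b) := by
          simp only [incOk, decide_eq_decide]; omega
        have hdec : decOk a b = decide (a > b) := by
          simp only [decOk, decide_eq_decide]
          constructor
          · intro hh; omega
          · intro hh; omega
        simp only [poLoop]
        rw [if_neg (not_not_intro h)]
        rw [ih]
        simp [allOk, hinc, hdec, List.all_append, Bool.and_assoc]
      · have hinc : incOk a b = false := by simp only [incOk, decide_eq_false_iff_not]; omega
        have hdec : decOk a b = false := by
          simp only [decOk, decide_eq_false_iff_not]; omega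
        simp [poLoop, h, allOk, hinc, hdec]

lemma part_one_eq (s : List Int) :
    part_one s = (allOk incOk s || allOk decOk s) := by
  simp [part_one, poLoop_eq]

lemma allOk_iff (ok : Int → Int → Bool) (s : List Int) :
    allOk ok s = true ↔ ∀ (k : Nat) (h : k + 1 < s.length), ok s[k] s[k + 1] = true := by
  induction s with
  | nil => exact ⟨fun _ k hk => absurd hk (by simp), fun _ => by simp [allOk]⟩
  | cons a t ih =>
    cases t with
    | nil =>
      refine ⟨fun _ k hk => absurd hk (by simp), fun _ => by simp [allOk]⟩
    | cons b r =>
      simp only [allOk, Bool.and_eq_true, ih]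
      constructor
      · rintro ⟨h1, h2⟩ k hk
        cases k with
        | zero => simpa using h1
        | succ k' => simpa using h2 k' (by simpa using hk)
      · intro h
        exact ⟨by simpa using h 0 (by simp), fun k hk =>
          by simpa using h (k + 1) (by simpa using hk)⟩

lemma fbAux_shift (ok : Int → Int → Bool) (s : List Int) (k : Nat) :
    fbAux ok (k + 1) s = (fbAux ok k s).map (· + 1) := by
  induction s generalizing k with
  | nil => simp [fbAux]
  | cons a t ih =>
    cases t with
    | nil => simp [fbAux]
    | cons b r =>
      by_cases h : ok a b = true
      · simp [fbAux, h, ih]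
      · simp [fbAux, h]

lemma firstBad_none_iff (ok : Int → Int → Bool) (s : List Int) :
    firstBad ok s = none ↔ allOk ok s = true := by
  induction s with
  | nil => simp [firstBad, fbAux, allOk]
  | cons a t ih =>
    cases t with
    | nil => simp [firstBad, fbAux, allOk]
    | cons b r =>
      by_cases h : ok a b = true
      · have hstep : firstBad ok (a :: b :: r) = (firstBad ok (b :: r)).map (· + 1) := by
          show fbAux ok 0 (a :: b :: r) = _
          simp only [fbAux, h, if_true]
          exact fbAux_shift ok (b :: r) 0
        rw [hstep]
        simp [Option.map_eq_none_iff, ih, allOk, h]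
      · simp [firstBad, fbAux, h, allOk]

lemma firstBad_some (ok : Int → Int → Bool) (s : List Int) (i : Nat)
    (h : firstBad ok s = some i) :
    ∃ hlt : i + 1 < s.length, ok (s[i]'(by omega)) (s[i + 1]'hlt) = false := by
  induction s generalizing i with
  | nil => simp [firstBad, fbAux] at h
  | cons a t ih =>
    cases t with
    | nil => simp [firstBad, fbAux] at h
    | cons b r =>
      by_cases hab : ok a b = true
      · have h' : (firstBad ok (b :: r)).map (· + 1) = some i := by
          have h1 : fbAux ok 1 (b :: r) = some i := by
            simpa [firstBad, fbAux, hab] using h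
          rw [show fbAux ok 1 (b :: r) = (fbAux ok 0 (b :: r)).map (· + 1) from
            fbAux_shift ok (b :: r) 0] at h1
          exact h1
        rcases Option.map_eq_some_iff.mp h' with ⟨j, hj, hji⟩
        obtain ⟨hlt, hbad⟩ := ih j hj
        subst hji
        refine ⟨by simp only [List.length_cons] at hlt ⊢; omega, ?_⟩
        simpa using hbad
      · have : i = 0 := by
          simpa [firstBad, fbAux, hab] using h.symm
        subst this
        exact ⟨by simp, by simpa using hab⟩

-- deletion of index j: length and elements
lemma del_length (s : List Int) (j : Nat) (hj : j < s.length) :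
    (s.take j ++ s.drop (j + 1)).length = s.length - 1 := by
  simp [List.length_append, List.length_take, List.length_drop]; omega

lemma del_get (s : List Int) (j : Nat) (hj : j < s.length) (p : Nat)
    (hp : p < s.length - 1) :
    (s.take j ++ s.drop (j + 1))[p]'(by rw [del_length s j hj]; omega) =
      if h : p < j then s[p]'(by omega) else s[p + 1]'(by omega) := by
  by_cases h : p < j
  · rw [List.getElem_append_left (by simp [List.length_take]; omega)]
    simp [h, List.getElem_take]
  · rw [List.getElem_append_right (by simp [List.length_take]; omega)]
    simp only [h, dif_neg, not_false_iff]
    rw [List.getElem_drop]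
    congr 1
    simp [List.length_take]
    omega

-- the key per-direction equivalence: brute-force over all removals = first-violation repair
lemma perDir (ok : Int → Int → Bool) (lst : List Int) :
    (allOk ok lst ||
      (List.range lst.length).any (fun i => allOk ok (lst.take i ++ lst.drop (i + 1)))) =
    safeWithOneRemoval ok lst := by
  cases hfb : firstBad ok lst with
  | none =>
    have hall : allOk ok lst = true := (firstBad_none_iff ok lst).mp hfb
    simp [safeWithOneRemoval, hfb, hall]
  | some i =>
    have hall : allOk ok lst = false := by
      rcases Bool.eq_false_or_eq_true (allOk ok lst) with h | h
      · have := (firstBad_none_iff ok lst).mpr (by exact h)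
        rw [hfb] at this; cases this
      · exact h
    obtain ⟨hlt, hbad⟩ := firstBad_some ok lst i hfb
    rw [Bool.eq_iff_iff]
    simp only [safeWithOneRemoval, hfb, hall, Bool.false_or, Bool.or_eq_true,
      List.any_eq_true, List.mem_range, Option.isNone_iff_eq_none, firstBad_none_iff]
    constructor
    · rintro ⟨j, hjn, hjsafe⟩
      by_cases hji : j = i
      · subst hji; exact Or.inl hjsafe
      by_cases hji1 : j = i + 1
      · subst hji1; exact Or.inr hjsafe
      -- j far from the violation: the bad pair survives the deletion, contradiction
      exfalso
      rw [allOk_iff] at hjsafe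
      by_cases hcase : j < i
      · -- bad pair sits at positions (i-1, i) of the deleted list
        obtain ⟨i', rfl⟩ : ∃ i', i = i' + 1 := ⟨i - 1, by omega⟩
        have hp : i' + 1 < (lst.take j ++ lst.drop (j + 1)).length := by
          rw [del_length lst j hjn]; omega
        have := hjsafe i' hp
        rw [del_get lst j hjn i' (by omega), del_get lst j hjn (i' + 1) (by omega)] at this
        have h1 : ¬ (i' < j) := by omega
        have h2 : ¬ (i' + 1 < j) := by omega
        simp only [h1, h2, dif_neg, not_false_iff] at this
        rw [this] at hbad
        cases hbad
      · -- j > i + 1 : bad pair sits at positions (i, i+1) of the deleted list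
        have hji' : i + 1 < j := by omega
        have hp : i + 1 < (lst.take j ++ lst.drop (j + 1)).length := by
          rw [del_length lst j hjn]; omega
        have := hjsafe i hp
        rw [del_get lst j hjn i (by omega), del_get lst j hjn (i + 1) (by omega)] at this
        have h1 : i < j := by omega
        simp only [h1, hji', dif_pos] at this
        rw [this] at hbad
        cases hbad
    · rintro (h | h)
      · exact ⟨i, by omega, h⟩
      · exact ⟨i + 1, by omega, h⟩

lemma any_or (l : List Nat) (f g : Nat → Bool) :
    l.any (fun i => f i || g i) = (l.any f || l.any g) := by
  induction l with
  | nil => simp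
  | cons a t ih =>
    simp only [List.any_cons, ih]
    cases f a <;> cases g a <;> simp

-- ===== VERDICT (by name: the statement is the Claim_ definition above) =====
theorem part_two_spec : Claim_equal_part_two := by
  intro lst _
  unfold Spec_part_two part_two part_two_alt
  rw [← perDir incOk lst, ← perDir decOk lst]
  simp only [part_one_eq]
  rw [any_or]
  cases h1 : allOk incOk lst <;> cases h2 : allOk decOk lst <;> simp
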